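-- pv_equiv track=rewrite | github.com/cauanicastro/Prog1Ifes | biblioteca.py | separaPalavraCompara
-- ===== SOURCE A (Python) =====
-- def separaPalavraCompara(linha, valor):
--     aux = ""
--     separadores = ['-']
--     palavras = 0
--     for letra in linha:
--         if letra.isalpha() or (aux and letra in separadores):
--             aux += letra
--         else:
--             if aux and aux == valor:
--                 palavras += 1
--             aux = ""
--     if aux and aux == valor:
--         palavras += 1
--     return palavras
-- ===== SOURCE B (Python) =====
-- def separaPalavraCompara(linha, valor):
--     # two-pointer tokenizer: find each word start, extend to its end by slicing,
--     # collect all words, then count matches once at the end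
--     palavras = []
--     i = 0
--     n = len(linha)
--     while i < n:
--         if linha[i].isalpha():
--             j = i + 1
--             while j < n and (linha[j].isalpha() or linha[j] == '-'):
--                 j += 1
--             palavras.append(linha[i:j])
--             i = j
--         else:
--             i += 1
--     return palavras.count(valor)
-- ===== Notes on version B (the rewrite author's own statement) =====
-- stated objective: alternative
-- what changed: Replaces A's char-by-char accumulator-and-flush loop with an index-based two-pointer tokenizer that slices out each maximal word (alpha start, alpha/dash continuation), collects the word list, and counts the matches once at the end.
import Mathlib
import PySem

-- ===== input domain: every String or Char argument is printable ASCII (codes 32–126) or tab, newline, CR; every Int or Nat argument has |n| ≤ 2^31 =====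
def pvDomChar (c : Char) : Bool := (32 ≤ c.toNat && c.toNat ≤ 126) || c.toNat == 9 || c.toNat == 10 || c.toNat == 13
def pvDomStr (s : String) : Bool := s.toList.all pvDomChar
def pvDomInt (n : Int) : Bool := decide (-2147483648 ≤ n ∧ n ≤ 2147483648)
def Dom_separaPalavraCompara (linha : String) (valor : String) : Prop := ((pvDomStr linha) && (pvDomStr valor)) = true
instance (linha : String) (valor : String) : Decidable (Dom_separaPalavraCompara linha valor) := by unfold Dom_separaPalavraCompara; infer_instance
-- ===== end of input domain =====

-- B replaces A's accumulator-and-flush char loop by an index-free two-pointer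
-- tokenizer (slice out each maximal word, then count matches once at the end);
-- objective: alternative (same cost, different algorithm).

-- ===== PORT A =====
-- the for-loop of A: state is (aux, palavras); after the loop the trailing aux is flushed
def sepLoopA (valor : List Char) : List Char → List Char → Int → Int
  | [], aux, palavras =>
      if !aux.isEmpty && aux == valor then palavras + 1 else palavras
  | letra :: rest, aux, palavras =>
      if PySem.Chars.isalpha letra || (!aux.isEmpty && letra == '-') then
        sepLoopA valor rest (aux ++ [letra]) palavras
      else
        if !aux.isEmpty && aux == valor then sepLoopA valor rest [] (palavras + 1)
        else sepLoopA valor rest [] palavras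

def separaPalavraCompara (linha : String) (valor : String) : Int :=
  sepLoopA valor.toList linha.toList [] 0

-- ===== PORT B =====
-- Source B's outer while loop: at a word start take the maximal alpha/dash run as a slice,
-- otherwise advance one char; collect the word list
def wordsB : List Char → List (List Char)
  | [] => []
  | c :: rest =>
      if PySem.Chars.isalpha c then
        (c :: rest.takeWhile (fun d => PySem.Chars.isalpha d || d == '-'))
          :: wordsB (rest.dropWhile (fun d => PySem.Chars.isalpha d || d == '-'))
      else
        wordsB rest
  termination_by l => l.length
  decreasing_by
    · simpa using Nat.lt_succ_of_le (List.length_dropWhile_le _ _)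
    · simp

def separaPalavraCompara_alt (linha : String) (valor : String) : Int :=
  PySem.List.count (wordsB linha.toList) valor.toList

-- ===== PRECONDITION & SPEC =====
def Spec_separaPalavraCompara (linha : String) (valor : String) (out : Int) : Prop := out = separaPalavraCompara_alt linha valor
instance (linha : String) (valor : String) (out : Int) : Decidable (Spec_separaPalavraCompara linha valor out) := by unfold Spec_separaPalavraCompara; infer_instance

-- ===== CLAIM (what is proved, stated in full; the proofs are below) =====
def Claim_equal_separaPalavraCompara : Prop := ∀ (linha : String) (valor : String), Dom_separaPalavraCompara linha valor → Spec_separaPalavraCompara linha valor (separaPalavraCompara linha valor)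

-- ===== LEMMAS AND PROOFS =====

-- the words A's loop would still emit, given current accumulator aux
def wordsA : List Char → List Char → List (List Char)
  | aux, [] => if aux.isEmpty then [] else [aux]
  | aux, c :: rest =>
      if PySem.Chars.isalpha c || (!aux.isEmpty && c == '-') then
        wordsA (aux ++ [c]) rest
      else
        if aux.isEmpty then wordsA [] rest else aux :: wordsA [] rest

theorem sepLoopA_eq_count (valor : List Char) :
    ∀ (cs aux : List Char) (p : Int),
      sepLoopA valor cs aux p = p + ((wordsA aux cs).count valor : Int) := by
  intro cs
  induction cs with
  | nil =>
      intro aux p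
      simp only [sepLoopA, wordsA]
      by_cases h : aux.isEmpty
      · simp [h]
      · simp only [h]
        by_cases hv : aux == valor
        · simp_all
        · simp_all
  | cons c rest ih =>
      intro aux p
      simp only [sepLoopA, wordsA]
      by_cases hc : PySem.Chars.isalpha c || (!aux.isEmpty && c == '-')
      · simp [hc, ih]
      · simp only [hc, Bool.false_eq_true, if_false]
        by_cases h : aux.isEmpty
        · simp [h, ih]
        · simp only [h]
          by_cases hv : aux == valor
          · simp_all
            ring
          · simp_all

theorem wordsA_cont :
    ∀ (cs aux : List Char), ¬ aux.isEmpty →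
      wordsA aux cs =
        (aux ++ cs.takeWhile (fun d => PySem.Chars.isalpha d || d == '-'))
          :: wordsA [] (cs.dropWhile (fun d => PySem.Chars.isalpha d || d == '-')) := by
  intro cs
  induction cs with
  | nil => intro aux h; simp_all [wordsA]
  | cons c rest ih =>
      intro aux h
      by_cases hc : (PySem.Chars.isalpha c || c == '-') = true
      · have haux : (!aux.isEmpty) = true := by simp_all
        have hcond : (PySem.Chars.isalpha c || (!aux.isEmpty && c == '-')) = true := by
          rcases Bool.or_eq_true_iff.mp hc with h1 | h1 <;> simp [h1, haux]
        simp only [wordsA, hcond, if_true, List.takeWhile_cons, List.dropWhile_cons, hc]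
        rw [ih (aux ++ [c]) (by simp)]
        simp
      · have hb : (PySem.Chars.isalpha c || c == '-') = false := Bool.eq_false_iff.mpr hc
        have hca : PySem.Chars.isalpha c = false := (Bool.or_eq_false_iff.mp hb).1
        have hcd : (c == '-') = false := (Bool.or_eq_false_iff.mp hb).2
        simp [wordsA, h, hca, hcd]

theorem wordsA_nil_eq_wordsB : ∀ cs : List Char, wordsA [] cs = wordsB cs := by
  intro cs
  induction cs using wordsB.induct with
  | case1 => simp [wordsA, wordsB]
  | case2 c rest hc ih =>
      rw [wordsB, if_pos hc, ← ih, wordsA]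
      have hcond : (PySem.Chars.isalpha c || (!(List.isEmpty ([] : List Char)) && c == '-')) = true := by
        simp [hc]
      rw [if_pos hcond]
      have := wordsA_cont rest ([] ++ [c]) (by simp)
      simpa using this
  | case3 c rest hc ih =>
      rw [wordsB, if_neg hc, ← ih, wordsA]
      have hca : PySem.Chars.isalpha c = false := by simpa using hc
      simp [hca]

-- ===== VERDICT (by name: the statement is the Claim_ definition above) =====
theorem separaPalavraCompara_spec : Claim_equal_separaPalavraCompara := by
  intro linha _ _
  unfold Spec_separaPalavraCompara separaPalavraCompara separaPalavraCompara_alt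
  rw [sepLoopA_eq_count, wordsA_nil_eq_wordsB, PySem.List.count_eq]
  simp
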